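-- pv_equiv track=rewrite | github.com/RuveMaximus/system-of-computer-math | modules/slae/slae.py | refresh_matrix
-- ===== SOURCE A (Python) =====
-- def count_row_position(row: list):
--     pos = 0
--     while row[pos] == 0: pos+=1
--     return pos
--
-- def refresh_matrix(m: list):
--     _matrix = [None]*len(m)
--     for row in m:
--         pos = count_row_position(row)
--         if _matrix[pos] is not None:
--             pos = _matrix.index(None, pos)
--
--         _matrix[pos] = row
--     return _matrix
-- ===== SOURCE B (Python) =====
-- def refresh_matrix(m: list):
--     # Union-find "next free slot": parent links jump over filled blocks, with
--     # path compression, instead of rescanning the built matrix with list.index.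
--     n = len(m)
--     parent = {}                    # filled slot -> candidate next free slot
--     out = [None] * n
--
--     def find(i):
--         path = []
--         while i in parent:
--             path.append(i)
--             i = parent[i]
--         for p in path:             # path compression
--             parent[p] = i
--         return i
--
--     for row in m:
--         pos = next(i for i, x in enumerate(row) if x != 0)
--         slot = find(pos)           # first free slot >= pos
--         out[slot] = row            # IndexError when there is none (A raises too)
--         parent[slot] = slot + 1
--     return out
-- ===== Notes on version B (the rewrite author's own statement) =====
-- stated objective: alternative
-- what changed: B finds the first free slot with a union-find 'next free slot' structure (parent pointers with path compression) instead of A's linear list.index rescans of the partially built matrix.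
import Mathlib
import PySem

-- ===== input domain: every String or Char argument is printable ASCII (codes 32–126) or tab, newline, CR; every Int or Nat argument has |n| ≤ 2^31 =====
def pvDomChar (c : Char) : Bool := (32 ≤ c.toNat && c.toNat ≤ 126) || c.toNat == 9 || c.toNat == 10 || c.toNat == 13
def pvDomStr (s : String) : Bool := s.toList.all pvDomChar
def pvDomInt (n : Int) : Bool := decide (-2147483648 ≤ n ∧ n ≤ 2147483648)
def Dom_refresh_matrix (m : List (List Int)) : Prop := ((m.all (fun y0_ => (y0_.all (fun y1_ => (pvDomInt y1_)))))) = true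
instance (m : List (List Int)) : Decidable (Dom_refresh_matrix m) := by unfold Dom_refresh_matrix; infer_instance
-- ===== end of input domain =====

-- B replaces A's list.index rescans of the partially built matrix with a union-find
-- "next free slot" structure with path compression; objective: alternative data structure.


-- ===== PORT A =====
-- count_row_position: 'pos=0; while row[pos]==0: pos+=1' as the obvious structural
-- recursion; Python raises IndexError past the end (all-zero row) — the port returns
-- row.length there, reached only outside Pre_.
def countRowPosition : List Int → Nat
  | [] => 0
  | x :: xs => if x == 0 then countRowPosition xs + 1 else 0

-- '_matrix.index(None, pos)' ported by hand (PySem.List.index? has no start argument):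
-- noneOffset counts the scan from the start position until the first None; Python raises
-- ValueError when there is none — the port then yields mat.length (only outside Pre_).
def noneOffset : List (Option (List Int)) → Nat
  | [] => 0
  | none :: _ => 0
  | some _ :: xs => noneOffset xs + 1

def indexNoneFrom (mat : List (Option (List Int))) (pos : Nat) : Nat :=
  pos + noneOffset (mat.drop pos)

-- one iteration of A's for-loop over '_matrix'; '_matrix[pos]' raises IndexError for
-- pos ≥ len (outside Pre_): there the port's getD reads None and the set is a no-op.
def stepA (mat : List (Option (List Int))) (row : List Int) : List (Option (List Int)) :=
  let pos := countRowPosition row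
  let pos' := if (mat.getD pos none).isSome then indexNoneFrom mat pos else pos
  mat.set pos' (some row)

-- Python returns the list itself, which can still contain None only outside Pre_;
-- the declared return type forces '.getD []' on each cell.
def refresh_matrix (m : List (List Int)) : List (List Int) :=
  ((m.foldl stepA (List.replicate m.length none)).map (fun o => o.getD []))

-- ===== PORT B =====
-- 'next(i for i, x in enumerate(row) if x != 0)'; StopIteration (all-zero row) is
-- outside Pre_, where findIdx returns row.length.
def firstNZ (row : List Int) : Nat := row.findIdx (fun x => x != 0)

-- B's 'while i in parent: path.append(i); i = parent[i]' loop; parent values strictly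
-- increase along a chain and stay ≤ n, so fuel n+1 always suffices (fuel exhaustion is
-- unreachable; proved in findRoot_spec below).
def findRoot (fuel : Nat) (parent : PySem.Dict Nat Nat) (i : Nat) (path : List Nat) :
    Nat × List Nat :=
  match fuel with
  | 0 => (i, path)
  | fuel + 1 =>
    match parent.get? i with
    | none => (i, path)
    | some v => findRoot fuel parent v (path ++ [i])

-- B's 'for p in path: parent[p] = i' (path compression)
def compress (parent : PySem.Dict Nat Nat) (path : List Nat) (root : Nat) :
    PySem.Dict Nat Nat :=
  path.foldl (fun d p => d.insert p root) parent

-- one iteration of B's for-loop: find the first free slot ≥ pos via the union-find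
-- pointers (compressing the path), place the row, link slot → slot+1. Python raises
-- IndexError at 'out[slot]' when slot ≥ n (outside Pre_): the port skips both writes
-- there (the compression has already happened, as in Python before the raise).
def stepB (st : PySem.Dict Nat Nat × List (Option (List Int))) (row : List Int) :
    PySem.Dict Nat Nat × List (Option (List Int)) :=
  let pos := firstNZ row
  let r := findRoot (st.2.length + 1) st.1 pos []
  let parent' := compress st.1 r.2 r.1
  if r.1 < st.2.length then (parent'.insert r.1 (r.1 + 1), st.2.set r.1 (some row))
  else (parent', st.2)

def refresh_matrix_alt (m : List (List Int)) : List (List Int) :=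
  let n := m.length
  let st := m.foldl stepB ((PySem.Dict.empty : PySem.Dict Nat Nat), List.replicate n none)
  st.2.map (fun o => o.getD [])

-- ===== PRECONDITION & SPEC =====
-- Pre_ is exactly the set where Python A returns normally: every row has a nonzero entry
-- (else count_row_position raises IndexError), and the Hall-type condition that for every
-- k at most len(m) - k rows have their first nonzero at position ≥ k (else _matrix[pos]
-- raises IndexError or _matrix.index(None, pos) raises ValueError).
def Pre_refresh_matrix (m : List (List Int)) : Prop :=
  (∀ row ∈ m, ∃ x ∈ row, x ≠ 0) ∧
  ∀ k ∈ List.range (m.length + 1),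
    (m.filter (fun row => decide (k ≤ (row.takeWhile (· == 0)).length))).length + k ≤ m.length

instance (m : List (List Int)) : Decidable (Pre_refresh_matrix m) := by
  unfold Pre_refresh_matrix; infer_instance

def pvWitness_refresh_matrix : List (List Int) := [[1, 0], [0, 2]]

def Spec_refresh_matrix (m : List (List Int)) (out : List (List Int)) : Prop := out = refresh_matrix_alt m
instance (m : List (List Int)) (out : List (List Int)) : Decidable (Spec_refresh_matrix m out) := by unfold Spec_refresh_matrix; infer_instance

-- ===== CLAIM (what is proved, stated in full; the proofs are below) =====
def Claim_equal_refresh_matrix : Prop := ∀ (m : List (List Int)), Dom_refresh_matrix m → Pre_refresh_matrix m → Spec_refresh_matrix m (refresh_matrix m)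

-- ===== LEMMAS AND PROOFS =====

-- chain invariant of B's union-find dict: every link k ↦ v jumps forward (k < v ≤ n)
-- over an all-keys interval [k, v)
def Chain (n : Nat) (parent : PySem.Dict Nat Nat) : Prop :=
  ∀ k v, parent.get? k = some v →
    k < v ∧ v ≤ n ∧ ∀ j, k ≤ j → j < v → (parent.get? j).isSome

-- the keys of B's dict are exactly A's occupied slots
def KeysOK (mat : List (Option (List Int))) (parent : PySem.Dict Nat Nat) : Prop :=
  ∀ j, (parent.get? j).isSome ↔ (j < mat.length ∧ (mat.getD j none).isSome)

def SimInv (n : Nat) (mat : List (Option (List Int)))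
    (st : PySem.Dict Nat Nat × List (Option (List Int))) : Prop :=
  st.2 = mat ∧ mat.length = n ∧ Chain n st.1 ∧ KeysOK mat st.1

lemma crp_eq_firstNZ (row : List Int) : countRowPosition row = firstNZ row := by
  induction row with
  | nil => rfl
  | cons x xs ih =>
    simp only [countRowPosition, firstNZ, List.findIdx_cons] at *
    by_cases h : x = 0
    · simp [h, ih]
    · have hb : (x != 0) = true := by simpa using h
      simp [h, hb]

lemma noneOffset_all_some (l : List (Option (List Int))) (h : ∀ o ∈ l, o ≠ none) :
    noneOffset l = l.length := by
  induction l with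
  | nil => rfl
  | cons o os ih =>
    cases o with
    | none => exact absurd rfl (h none (by simp))
    | some r => simp [noneOffset, ih (fun o ho => h o (by simp [ho]))]

lemma noneOffset_eq (l : List (Option (List Int))) (k : Nat)
    (hk : l[k]? = some none) (hbefore : ∀ j, j < k → ∃ r, l[j]? = some (some r)) :
    noneOffset l = k := by
  induction l generalizing k with
  | nil => simp at hk
  | cons o os ih =>
    cases k with
    | zero => simp at hk; subst hk; rfl
    | succ k =>
      obtain ⟨r, hr⟩ := hbefore 0 (Nat.succ_pos _)
      simp at hr; subst hr
      simp only [noneOffset]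
      rw [ih k (by simpa using hk) (fun j hj => by simpa using hbefore (j+1) (by omega))]

-- findRoot returns a non-key r ≥ i, the interval [i, r) is all keys, r ≤ max i n, and
-- the collected path extends the accumulator by keys of [i, r)
-- findRoot returns a non-key r ≥ i, the interval [i, r) is all keys, r ≤ n whenever the
-- start is a key, and the collected path extends the accumulator by keys of [i, r)
lemma findRoot_spec (n : Nat) (parent : PySem.Dict Nat Nat) (hch : Chain n parent)
    (fuel : Nat) (i : Nat) (path : List Nat) (hfuel : n + 1 ≤ fuel + i) :
    parent.get? (findRoot fuel parent i path).1 = none ∧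
    i ≤ (findRoot fuel parent i path).1 ∧
    ((parent.get? i).isSome → (findRoot fuel parent i path).1 ≤ n) ∧
    (∀ j, i ≤ j → j < (findRoot fuel parent i path).1 → (parent.get? j).isSome) ∧
    (∀ q ∈ (findRoot fuel parent i path).2, q ∈ path ∨
       (i ≤ q ∧ q < (findRoot fuel parent i path).1 ∧ (parent.get? q).isSome)) := by
  induction fuel generalizing i path with
  | zero =>
    -- fuel 0 with the fuel bound: i ≥ n + 1, so i cannot be a key (Chain bounds keys by n)
    have hnk : parent.get? i = none := by
      cases hgi : parent.get? i with
      | none => rfl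
      | some v =>
        obtain ⟨h1, h2, -⟩ := hch i v hgi
        omega
    simp only [findRoot]
    exact ⟨hnk, le_refl i, fun hik => by rw [hnk] at hik; simp at hik,
      fun j h1 h2 => absurd h1 (by omega), fun q hq => Or.inl hq⟩
  | succ fuel ih =>
    cases hgi : parent.get? i with
    | none =>
      have hres : findRoot (fuel + 1) parent i path = (i, path) := by
        simp [findRoot, hgi]
      rw [hres]
      exact ⟨hgi, le_refl i, fun hik => by simp at hik,
        fun j h1 h2 => absurd h1 (by omega), fun q hq => Or.inl hq⟩
    | some v =>
      obtain ⟨hiv, hvn, hint⟩ := hch i v hgi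
      obtain ⟨a, b, c, d, e⟩ := ih v (path ++ [i]) (by omega)
      have hres : findRoot (fuel + 1) parent i path = findRoot fuel parent v (path ++ [i]) := by
        simp [findRoot, hgi]
      rw [hres]
      refine ⟨a, by omega, fun _ => ?_, fun j h1 h2 => ?_, fun q hq => ?_⟩
      · cases hgv : parent.get? v with
        | some w => exact c (by simp [hgv])
        | none =>
          have hr : (findRoot fuel parent v (path ++ [i])).1 = v := by
            by_contra hne
            have := d v (le_refl v) (by omega)
            rw [hgv] at this
            simp at this
          omega
      · by_cases hjv : j < v
        · exact hint j h1 hjv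
        · exact d j (by omega) h2
      · rcases e q hq with h | h
        · rcases List.mem_append.mp h with h1 | h2
          · exact Or.inl h1
          · simp at h2; subst h2
            exact Or.inr ⟨le_refl q, by omega, by simp [hgi]⟩
        · exact Or.inr ⟨by omega, h.2.1, h.2.2⟩

lemma compress_get? (parent : PySem.Dict Nat Nat) (path : List Nat) (root : Nat)
    (j : Nat) :
    (compress parent path root).get? j =
      if j ∈ path then some root else parent.get? j := by
  induction path generalizing parent with
  | nil => simp [compress]
  | cons p ps ih =>
    simp only [compress, List.foldl_cons] at *
    rw [ih]
    by_cases hps : j ∈ ps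
    · simp [hps]
    · by_cases hjp : j = p
      · subst hjp; simp [hps, PySem.Dict.get?_insert_self]
      · simp [hps, hjp, PySem.Dict.get?_insert_of_ne parent root hjp]

-- one synchronized step preserves the invariant
lemma step_inv (n : Nat) (mat : List (Option (List Int)))
    (st : PySem.Dict Nat Nat × List (Option (List Int))) (row : List Int)
    (h : SimInv n mat st) : SimInv n (stepA mat row) (stepB st row) := by
  obtain ⟨hout, hlen, hch, hkeys⟩ := h
  simp only [stepA, stepB, ← crp_eq_firstNZ row, hout, hlen]
  set pos := countRowPosition row with hposdef
  obtain ⟨hrnk, hrle, hrbnd, hrint, hrpath⟩ :=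
    findRoot_spec n st.1 hch (n + 1) pos [] (by omega)
  set r := (findRoot (n + 1) st.1 pos []).1 with hrdef
  set path := (findRoot (n + 1) st.1 pos []).2 with hpathdef
  have hpath' : ∀ q ∈ path, pos ≤ q ∧ q < r ∧ (st.1.get? q).isSome := by
    intro q hq; rcases hrpath q hq with h | h
    · simp at h
    · exact h
  -- the compressed dict: same keys, chain preserved
  have hcget : ∀ j, (compress st.1 path r).get? j =
      if j ∈ path then some r else st.1.get? j := compress_get? st.1 path r
  have hckeys : ∀ j, ((compress st.1 path r).get? j).isSome = (st.1.get? j).isSome := by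
    intro j; rw [hcget]
    by_cases hj : j ∈ path
    · simp [hj, (hpath' j hj).2.2]
    · simp [hj]
  have hrval : (st.1.get? pos).isSome → r ≤ n := hrbnd
  have hcch : Chain n (compress st.1 path r) := by
    intro k v hkv
    rw [hcget] at hkv
    by_cases hk : k ∈ path
    · rw [if_pos hk] at hkv
      injection hkv with hv; subst hv
      obtain ⟨h1, h2, h3⟩ := hpath' k hk
      have hposk : (st.1.get? pos).isSome := hrint pos (le_refl pos) (by omega)
      exact ⟨h2, hrval hposk, fun j hj1 hj2 => by
        rw [hckeys]; exact hrint j (by omega) hj2⟩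
    · rw [if_neg hk] at hkv
      obtain ⟨h1, h2, h3⟩ := hch k v hkv
      exact ⟨h1, h2, fun j hj1 hj2 => by rw [hckeys]; exact h3 j hj1 hj2⟩
  -- A's chosen slot equals r when r < n, and is n (a no-op set) when r = n
  have hocc : ∀ j, pos ≤ j → j < r → (mat.getD j none).isSome := by
    intro j h1 h2
    exact ((hkeys j).mp (hrint j h1 h2)).2
  have hrfree : r < n → mat.getD r none = none := by
    intro hrn
    cases hg : mat.getD r none with
    | none => rfl
    | some x =>
      have := (hkeys r).mpr ⟨by omega, by rw [hg]; rfl⟩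
      rw [hrnk] at this; simp at this
  by_cases hposocc : (mat.getD pos none).isSome
  · -- collision branch of A
    have hposk : (st.1.get? pos).isSome := (hkeys pos).mpr ⟨by
        by_contra hc
        rw [List.getD_eq_default _ _ (by omega : mat.length ≤ pos)] at hposocc
        simp at hposocc, hposocc⟩
    have hposr : pos < r := by
      rcases Nat.lt_or_ge pos r with h | h
      · exact h
      · have : r = pos := by omega
        rw [this, hposdef] at hrnk
        rw [hrnk] at hposk; simp at hposk
    have hrn : r ≤ n := hrbnd hposk
    rw [if_pos hposocc]
    by_cases hrlt : r < n
    · -- A's index(None, pos) finds exactly slot r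
      have hidx : indexNoneFrom mat pos = r := by
        unfold indexNoneFrom
        have hoff : noneOffset (mat.drop pos) = r - pos := by
          apply noneOffset_eq
          · rw [List.getElem?_drop]
            have hps : pos + (r - pos) = r := by omega
            rw [hps, List.getElem?_eq_getElem (by omega : r < mat.length)]
            have := hrfree hrlt
            rw [List.getD_eq_getElem _ _ (by omega : r < mat.length)] at this
            rw [this]
          · intro j hj
            rw [List.getElem?_drop]
            have hlt : pos + j < mat.length := by omega
            have hs := hocc (pos + j) (by omega) (by omega)
            rw [List.getD_eq_getElem _ _ hlt] at hs
            cases hcase : mat[pos + j]'hlt with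
            | none => rw [hcase] at hs; simp at hs
            | some x => exact ⟨x, by rw [List.getElem?_eq_getElem hlt, hcase]⟩
        rw [hoff]; omega
      rw [hidx, if_pos hrlt]
      refine ⟨rfl, by rw [List.length_set, hlen], ?_, ?_⟩
      · -- chain with the new link r ↦ r+1
        intro k v hkv
        by_cases hkr : k = r
        · subst hkr
          rw [PySem.Dict.get?_insert_self] at hkv
          injection hkv with hv; subst hv
          refine ⟨by omega, by omega, fun j h1 h2 => ?_⟩
          have hj : j = r := by omega
          rw [hj, PySem.Dict.get?_insert_self]
          rfl
        · rw [PySem.Dict.get?_insert_of_ne _ _ (hkr)] at hkv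
          obtain ⟨h1, h2, h3⟩ := hcch k v hkv
          refine ⟨h1, h2, fun j h1' h2' => ?_⟩
          by_cases hjr : j = r
          · subst hjr; simp [PySem.Dict.get?_insert_self]
          · rw [PySem.Dict.get?_insert_of_ne _ _ hjr]
            exact h3 j h1' h2'
      · -- keys = occupied slots, with r added to both
        intro j
        by_cases hjr : j = r
        · rw [hjr]
          simp [PySem.Dict.get?_insert_self, List.length_set,
            List.getD_eq_getElem?_getD, (show r < mat.length by omega)]
        · rw [PySem.Dict.get?_insert_of_ne _ _ (hjr), hckeys,
            List.length_set]
          have : (mat.set r (some row)).getD j none = mat.getD j none := by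
            rw [List.getD_eq_getElem?_getD, List.getElem?_set_ne (fun h => hjr h.symm),
              ← List.getD_eq_getElem?_getD]
          rw [this]
          exact hkeys j
    · -- r = n: all slots ≥ pos occupied; A's scan runs to the end (set is a no-op),
      -- B's branch is skipped — only the path compression changed the dict
      have hrn' : r = n := by omega
      have hidx : indexNoneFrom mat pos = mat.length := by
        unfold indexNoneFrom
        rw [noneOffset_all_some, List.length_drop]
        · omega
        · intro o ho hcon; subst hcon
          obtain ⟨k, hk, hko⟩ := List.mem_iff_getElem.mp ho
          have hk' : pos + k < n := by
            rw [List.length_drop, hlen] at hk; omega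
          have hs := hocc (pos + k) (by omega) (by omega)
          have h1 : (mat.drop pos)[k]? = some none := by
            rw [List.getElem?_eq_getElem hk, hko]
          rw [List.getElem?_drop] at h1
          rw [List.getD_eq_getElem?_getD, h1] at hs
          simp at hs
      rw [hidx, if_neg (show ¬ r < n by omega),
        List.set_eq_of_length_le (by omega : mat.length ≤ mat.length)]
      exact ⟨rfl, hlen, hcch, fun j => by rw [hckeys]; exact hkeys j⟩
  · -- free branch of A: pos itself is free, so r = pos and the path is empty
    have hposnk : st.1.get? pos = none := by
      cases hg : st.1.get? pos with
      | none => rfl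
      | some v =>
        have := (hkeys pos).mp (by simp [hg])
        exact absurd this.2 (by simpa using hposocc)
    have hrpos : r = pos := by
      by_contra hne
      have := hrint pos (le_refl pos) (by omega)
      rw [hposnk] at this; simp at this
    have hpathnil : path = [] := by
      cases hp : path with
      | nil => rfl
      | cons q qs =>
        have := hpath' q (by rw [hp]; simp)
        omega
    rw [if_neg hposocc, hrpos, hpathnil]
    simp only [compress, List.foldl_nil]
    by_cases hposn : pos < n
    · rw [if_pos hposn]
      refine ⟨rfl, by rw [List.length_set, hlen], ?_, ?_⟩
      · intro k v hkv
        by_cases hkr : k = pos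
        · subst hkr
          rw [PySem.Dict.get?_insert_self] at hkv
          injection hkv with hv; subst hv
          refine ⟨by omega, by omega, fun j h1 h2 => ?_⟩
          have hj : j = pos := by omega
          rw [hj, PySem.Dict.get?_insert_self]
          rfl
        · rw [PySem.Dict.get?_insert_of_ne _ _ (hkr)] at hkv
          obtain ⟨h1, h2, h3⟩ := hch k v hkv
          refine ⟨h1, h2, fun j h1' h2' => ?_⟩
          by_cases hjr : j = pos
          · subst hjr; simp [PySem.Dict.get?_insert_self]
          · rw [PySem.Dict.get?_insert_of_ne _ _ hjr]
            exact h3 j h1' h2'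
      · intro j
        by_cases hjr : j = pos
        · rw [hjr]
          simp [PySem.Dict.get?_insert_self, List.length_set,
            List.getD_eq_getElem?_getD, (show pos < mat.length by omega)]
        · rw [PySem.Dict.get?_insert_of_ne _ _ hjr, List.length_set]
          have : (mat.set pos (some row)).getD j none = mat.getD j none := by
            rw [List.getD_eq_getElem?_getD, List.getElem?_set_ne (fun h => hjr h.symm),
              ← List.getD_eq_getElem?_getD]
          rw [this]
          exact hkeys j
    · rw [if_neg hposn, List.set_eq_of_length_le (by omega)]
      exact ⟨rfl, hlen, hch, hkeys⟩

lemma fold_inv (n : Nat) (rows : List (List Int)) (mat : List (Option (List Int)))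
    (st : PySem.Dict Nat Nat × List (Option (List Int))) (h : SimInv n mat st) :
    SimInv n (rows.foldl stepA mat) (rows.foldl stepB st) := by
  induction rows generalizing mat st with
  | nil => exact h
  | cons row rows ih =>
    simp only [List.foldl_cons]
    exact ih _ _ (step_inv n mat st row h)

lemma inv_init (n : Nat) :
    SimInv n (List.replicate n none)
      ((PySem.Dict.empty : PySem.Dict Nat Nat), List.replicate n none) := by
  refine ⟨rfl, List.length_replicate, ?_, ?_⟩
  · intro k v hkv
    rw [PySem.Dict.get?_empty] at hkv
    exact absurd hkv (by simp)
  · intro j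
    by_cases hj : j < n <;>
      simp [PySem.Dict.get?_empty, hj, List.getD_eq_getElem?_getD]

lemma ports_agree (m : List (List Int)) : refresh_matrix m = refresh_matrix_alt m := by
  have h := fold_inv m.length m (List.replicate m.length none)
    ((PySem.Dict.empty : PySem.Dict Nat Nat), List.replicate m.length none)
    (inv_init m.length)
  obtain ⟨hout, -, -, -⟩ := h
  unfold refresh_matrix refresh_matrix_alt
  exact (congrArg (List.map (fun o => o.getD [])) hout).symm

-- ===== VERDICT (by name: the statement is the Claim_ definition above) =====
theorem refresh_matrix_spec : Claim_equal_refresh_matrix := by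
  intro m _ _
  unfold Spec_refresh_matrix
  exact ports_agree m
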